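/- GENERATED by mk_final_copies.py from the proof of the farm's unit `compute_codewords.5` (farm:compute_codewords.5.1: Proof.lean) as the
   re-elaboration sweep compiled it — do not edit. -/
import Asan.CheckWalk
import Vorbis.Spec.Units.compute_codewords_5

/- Segment 5 of `compute_codewords` (`cut8` 0x108345, the head of the main loop 1141 `for (i = k+1; i < n; ++i)`, … `chk6` 0x10835c, or
   the `ret`; stb_vorbis_fixed.c 1141, 1165): `i < n`: on to the check of `len[i]`; `i ≥ n`: `return TRUE` through 0x1083a9 (the shadow
   index reloaded from `[rsp+28H]`) and the epilogue (the frame's shadow bytes cleared: `cw_frame_popped`). At the exit `i = n`, so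
   `m = usedCount n = se` (CNT, `cw_used_all`) and the loop invariant's VAL is the post's (`cw_val_carry` over the epilogue's shadow stores).
   `cw5_walk` is the farm worker's continuation-passing walk (generic in the target `Q`; `r12` is carried); the unit's theorem applies
   it to the entry assertion `AtMain i` and builds the exit assertion `AtLen i`. -/
open X86 X86.User Asan Vorbis Vorbis.Spec
open Vorbis.Spec.compute_codewords

set_option maxRecDepth 4000
set_option maxHeartbeats 4000000

namespace Vorbis.Spec.compute_codewords_5

/-- **SEGMENT 5a: cut8 0x108345 (head of the main loop 1132) → either `i ≥ n`: `return TRUE` through 0x1083a9 and the epilogue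
to the `ret` (eax = 1; `hval`: what the loop invariant says of `values` when `i = n`), or chk6 0x10835c (the check of `len[i]`)** -/
theorem cw5_walk {Lay : Layout} (hLay : Lay.hi = 0x1000000) {μ : Microarch} (hμ : UserX.MicroOK μ) {u₀ : State}
    (hcode : HasCodeNat Lay u₀ Vorbis.L.compute_codewords.entry Vorbis.Code.code_compute_codewords.nat Vorbis.L.compute_codewords.size)
    {others : List Obj} {frames : List (Nat × FrameLayout)} {Blk : Block → Prop} {u : State} {ret : Word}
    (hsh : ShadowPre others frames u)
    (he_room : 7340032 + 400 ≤ (u.reg .rsp).toNat)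
    (he_top : (u.reg .rsp).toNat + 8 ≤ 8388608) (he_ret_lt : ret < 1073741824) (he_stack : Lay.Has (u.reg .rsp - 400) 408)
    (hn24 : (u.reg .rdx).toNat % 2 ^ 32 < 16777216)
    {s : State} {ws : List Span} (i : Nat)
    (w_rip : s.rip = Vorbis.L.compute_codewords.cut8) (w_r13 : s.reg .r13 = Word.ofBV (BitVec.ofNat 32 i))
    {X : Word} (w_r12 : s.reg .r12 = X)
    (hi : i ≤ (u.reg .rdx).toNat % 2 ^ 32)
    (w_kept : RegsKept cw_allRegs u s) (hb : CwBody u₀ u ret ws s)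
    (hslot : UInt64.ofNat (s.mem.readLE (u.reg .rsp - 256) 8) = (u.reg .rsp - 248) >>> 3)
    (hfoot : ∀ S : Mem, Mem.SameExcept (⟨(u.reg .rsp).toNat - 400, (u.reg .rsp).toNat⟩ ::
      ⟨0xC00000 + ((u.reg .rsp).toNat - 248) / 8, 0xC00000 + ((u.reg .rsp).toNat - 248) / 8 + 24⟩ :: ws) u.mem S →
      Mem.SameExcept ((Vorbis.Spec.compute_codewords.spec others frames Blk).footprint u) u.mem S)
    (hval : i = (u.reg .rdx).toNat % 2 ^ 32 → Codebook.sparse u.mem (u.reg .rdi).toNat ≠ 0 → ∀ S : Mem,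
      Mem.SameExcept [⟨0xC00000, 0xE00000⟩] s.mem S →
      VAL S (u.reg .rcx).toNat (Codebook.sorted_entries u.mem (u.reg .rdi).toNat).toNat (argU32 (u.reg .rdx)))
    {Q : State → Prop}
    (hcont : ∀ s' : State, s'.rip = Vorbis.L.compute_codewords.chk6 → i < (u.reg .rdx).toNat % 2 ^ 32 →
      s'.reg .r13 = Word.ofBV (BitVec.ofNat 32 i) → s'.reg .r12 = X →
      s'.reg .rbp = Word.ofBV (BitVec.signExtend 64 (BitVec.ofNat 32 i)) + u.reg .rsi →
      s'.reg .rdi = Word.ofBV (BitVec.signExtend 64 (BitVec.ofNat 32 i)) + u.reg .rsi →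
      s'.mem = s.mem → CwBody u₀ u ret ws s' →
      ReachVia Lay μ Vorbis.WayInv s' Q)
    (hret : ∀ v : State, Returned (Vorbis.conv u₀) (Vorbis.Spec.compute_codewords.spec others frames Blk) u ret v → Q v) :
    ReachVia Lay μ Vorbis.WayInv s Q := by
  obtain ⟨w_rsp, w_eq, hdf, hmx, hsame, hbody, hs0, hs1, hs2, hs3, hs4, hs5, hs6, hsLen, hsC, hsVal, hsN⟩ := hb
  have hsp := hsh.rsp
  have w_sse : SseOK s := ⟨hmx⟩
  have h0rsp := w_rsp
  have h0eq := w_eq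
  have hN : ShadowUntouched u.mem (cw_prologueMem u) := by
    unfold cw_prologueMem
    v_untouched
  have ea1 : ((u.reg .rsp - 248) >>> 3 + 12582912).toNat = 12582912 + ((u.reg .rsp).toNat - 248) / 8 := by
    u_omega
  have ea2 : ((u.reg .rsp - 248) >>> 3 + 12582932).toNat = 12582932 + ((u.reg .rsp).toNat - 248) / 8 := by
    u_omega
  unfold cw_allRegs at w_kept
  u_walk hcode [hμ.vendor] until [Vorbis.L.compute_codewords.chk6] span [Vorbis.L.textLo, Vorbis.L.textHi] side (v_side)
  · -- `i ≥ n`: `return TRUE`: 0x1083a9 (the shadow index reloaded) → the epilogue → the `ret`, eax = 1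
    have hin : i = (u.reg .rdx).toNat % 2 ^ 32 := by
      rw [Asan.part32_toNat, cw_toInt_lit32 _ (by omega), cw_toInt_lit32 _ (by omega)] at hbr_10834c
      omega
    refine ReachVia.done (hret _ ?_)
    v_returned
    · refine ⟨?_, Or.inr ?_, ?_⟩
      · rw [w_mem]
        exact cw_frame_popped (u.reg .rsp) hsh.inv.stack.clean (by omega) he_top hN hbody
      · rw [w_rax]
        rfl
      · intro _ hsparse
        refine hval hin hsparse _ ?_
        u_same
    · apply hfoot
      u_same
  · -- `i < n`: on to the check of `len[i]` (chk6)
    have hlt : i < (u.reg .rdx).toNat % 2 ^ 32 := by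
      rw [Asan.part32_toNat, cw_toInt_lit32 _ (by omega), cw_toInt_lit32 _ (by omega)] at hbr_10834c
      omega
    have hbK : CwBody u₀ u ret ws s :=
      ⟨h0rsp, h0eq, hdf, hmx, hsame, hbody, hs0, hs1, hs2, hs3, hs4, hs5, hs6, hsLen, hsC, hsVal, hsN⟩
    have hE : Mem.EqOn ((u.reg .rsp).toNat - 296) ((u.reg .rsp).toNat + 8) s.mem s_108359.mem := by
      rw [w_mem]
      exact Mem.EqOn.refl _ _ _
    have hi' : X86.User.abiInv s_108359 := by
      v_inv
    exact hcont s_108359 w_rip hlt w_r13 w_r12 w_rbp w_rdi w_mem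
      (hbK.carry hE he_room he_top w_rsp w_eq hi'.1 hi'.2 (by rw [w_mem]; exact hsame) (by rw [w_mem]; exact hbody))

end Vorbis.Spec.compute_codewords_5

/-- Unit `compute_codewords.5`: from `AtMain i` at `cut8` to `AtLen i` at `chk6` (`i < n`), or to the function's `Returned`
(`i = n`, `return TRUE`). -/
theorem Vorbis.Spec.Worked.compute_codewords_5_ok : Vorbis.Spec.compute_codewords_5.Statement := by
  intro Lay hLay μ hμ u₀ hcode others frames Blk u ret i v hat
  -- the entry state's facts, from the `AtEntry` the assertion carries
  have he := hat.entry
  v_entry he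
  have hpre := hat.pre
  refine Vorbis.Spec.compute_codewords_5.cw5_walk (Blk := Blk) hLay hμ hcode hpre.shadow he_room he_top he_ret_lt he_stack (cw_n_lt hpre) i
    hat.rip hat.r13 hat.r12 hat.i_le (cw_kept_all u v) hat.body hat.slot ?_ ?_ ?_ ?_
  · -- the footprint at the exit: inside the contract's
    exact cw_foot_of_body others frames Blk u (cwWindows u) (fun _ h => h)
  · -- VAL at the exit: `i = n`, `m = usedCount n = se`
    intro hin hsparse S hS
    have hv := hat.val hsparse
    rw [hin, cw_used_all hpre hsparse] at hv
    refine cw_val_carry hpre he_room he_top hsparse (Nat.le_refl _) hv hS ?_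
    intro w hw
    have e : w = ⟨0xC00000, 0xE00000⟩ := List.mem_singleton.mp hw
    rw [e]
    exact Or.inr (Nat.le_refl _)
  · -- `i < n`: the exit assertion `AtLen i`
    intro s' h_rip hlt h_r13 h_r12 h_rbp h_rdi h_mem hbody
    refine ReachVia.done (Or.inl ⟨⟨hat.entry, hpre, hbody⟩, h_rip, hlt, h_r13, h_r12, h_rbp, h_rdi, ?_, ?_⟩)
    · rw [h_mem]
      exact hat.slot
    · rw [h_mem]
      exact hat.val
  · -- `i = n`: returned
    intro w hw
    exact Or.inr hw
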